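-- pv_equiv track=rewrite | github.com/sanjaysagar12/HloMailAPI | include/EmailTemplates.py | replace_asterisks
-- ===== SOURCE A (Python) =====
-- def replace_asterisks(input_string):
--     result = []
--     asterisk_count = 0
--     ignore = False
--
--     i = 0
--     while i < len(input_string):
--         if input_string[i] == '*':
--             if ignore:
--                 result.append('*')
--                 i += 1
--                 continue
--
--             if asterisk_count % 2 == 0:
--                 start = i
--                 end = input_string.find('*', start + 1)
--                 if end == -1:
--                     result.append(input_string[i:])
--                     break
--                 if ' ' in input_string[start:end]:
--                     ignore = True
--                     result.append('*')
--                 else: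
--                     result.append('<strong>')
--                     asterisk_count += 1
--             else:
--                 result.append('</strong>')
--                 asterisk_count += 1
--         else:
--             result.append(input_string[i])
--         i += 1
--
--         if asterisk_count % 2 == 0:
--             ignore = False
--
--     return ''.join(result)
-- ===== SOURCE B (Python) =====
-- def replace_asterisks(input_string):
--     parts = input_string.split('*')
--     out = [parts[0]]
--     i = 1
--     n = len(parts)
--     while i < n:
--         if i < n - 1 and ' ' not in parts[i]:
--             out.append('<strong>' + parts[i] + '</strong>')
--             out.append(parts[i + 1])
--             i += 2
--         else:
--             out.append('*' + parts[i])
--             i += 1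
--     return ''.join(out)
-- ===== Notes on version B (the rewrite author's own statement) =====
-- stated objective: faster
-- what changed: Replaces the character-by-character state machine (parity counter, ignore flag, repeated find and slice rescans) with one split on the asterisk character followed by a single pass over the segments that pairs adjacent space-free segments into strong tags.
import Mathlib
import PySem

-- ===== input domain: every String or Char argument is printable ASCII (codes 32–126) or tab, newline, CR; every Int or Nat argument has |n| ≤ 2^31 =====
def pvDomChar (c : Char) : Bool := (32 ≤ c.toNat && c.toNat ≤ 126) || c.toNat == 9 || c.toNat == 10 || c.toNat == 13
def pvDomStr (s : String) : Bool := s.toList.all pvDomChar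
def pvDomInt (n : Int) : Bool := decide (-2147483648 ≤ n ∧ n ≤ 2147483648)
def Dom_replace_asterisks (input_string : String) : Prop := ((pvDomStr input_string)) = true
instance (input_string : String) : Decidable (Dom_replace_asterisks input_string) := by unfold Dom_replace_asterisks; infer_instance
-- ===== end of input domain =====

-- B replaces A's char-by-char state machine with a split on the asterisk character plus one pass over the segments (measured faster); same return value, proved below.

-- ===== PORT A =====
-- Python strings handled as List Char; the result list's entries are the appended strings' char lists, joined at the end.
def pvLoopA (s : List Char) (i : Nat) (count : Nat) (ignore : Bool) (acc : List (List Char)) : List (List Char) :=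
  if h : i < s.length then
    if s[i] = '*' then
      if ignore then
        pvLoopA s (i+1) count ignore (acc ++ [['*']])
      else if count % 2 = 0 then
        let e := PySem.Chars.findFrom s ['*'] ((i : Int) + 1)
        if e = -1 then acc ++ [s.drop i]
        else if PySem.Chars.isIn [' '] (PySem.List.slice s (some (i : Int)) (some e)) then
          pvLoopA s (i+1) count (if count % 2 = 0 then false else true) (acc ++ [['*']])
        else
          pvLoopA s (i+1) (count+1) (if (count+1) % 2 = 0 then false else ignore) (acc ++ ["<strong>".toList])
      else
        pvLoopA s (i+1) (count+1) (if (count+1) % 2 = 0 then false else ignore) (acc ++ ["</strong>".toList])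
    else
      pvLoopA s (i+1) count (if count % 2 = 0 then false else ignore) (acc ++ [[s[i]]])
  else acc
termination_by s.length - i
decreasing_by all_goals omega


def replace_asterisks (input_string : String) : String :=
  String.ofList (PySem.Chars.join [] (pvLoopA input_string.toList 0 0 false []))

-- ===== PORT B =====
-- one pass over the tail segments of input.split('*'): wrap a non-last, space-free
-- segment (consuming its closing segment), otherwise re-emit the '*' literally
def pvLoopB : List (List Char) → List (List Char)
  | [] => []
  | [p] => [('*' :: p)]
  | p :: p' :: ps =>
    if PySem.Chars.isIn [' '] p = false then
      ("<strong>".toList ++ p ++ "</strong>".toList) :: p' :: pvLoopB ps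
    else
      ('*' :: p) :: pvLoopB (p' :: ps)


def replace_asterisks_alt (input_string : String) : String :=
  match PySem.Chars.splitOn input_string.toList ['*'] with
  | [] => ""   -- unreachable: split never returns an empty list
  | p0 :: rest => String.ofList (PySem.Chars.join [] (p0 :: pvLoopB rest))

-- ===== PRECONDITION & SPEC =====
def Spec_replace_asterisks (input_string : String) (out : String) : Prop := out = replace_asterisks_alt input_string
instance (input_string : String) (out : String) : Decidable (Spec_replace_asterisks input_string out) := by unfold Spec_replace_asterisks; infer_instance

-- ===== CLAIM (what is proved, stated in full; the proofs are below) =====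
def Claim_equal_replace_asterisks : Prop := ∀ (input_string : String), Dom_replace_asterisks input_string → Spec_replace_asterisks input_string (replace_asterisks input_string)

-- ===== LEMMAS AND PROOFS =====

def pvSpl (pre : List Char) : List Char → List (List Char)
  | [] => [pre]
  | c :: t => if c = '*' then pre :: pvSpl [] t else pvSpl (pre ++ [c]) t

def pvHd : List Char → List Char
  | [] => []
  | c :: t => if c = '*' then [] else c :: pvHd t

def pvTl : List Char → List (List Char)
  | [] => []
  | c :: t => if c = '*' then pvSpl [] t else pvTl t

theorem pv_isIn_singleton (c : Char) (l : List Char) :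
    PySem.Chars.isIn [c] l = true ↔ c ∈ l := by
  rw [PySem.Chars.isIn_iff_infix]; exact List.singleton_infix_iff c l

theorem pv_go_spec (fuel : Nat) : ∀ (l cur : List Char) (acc : List (List Char)),
    l.length < fuel →
    PySem.Chars.splitOn.go ['*'] fuel l cur acc = acc.reverse ++ pvSpl cur.reverse l := by
  induction fuel with
  | zero => intro l cur acc h; omega
  | succ f ih =>
    intro l cur acc h
    cases l with
    | nil => simp [PySem.Chars.splitOn.go, pvSpl]
    | cons c rest =>
      rw [PySem.Chars.splitOn.go]
      by_cases hc : c = '*'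
      · subst hc
        rw [if_pos (by rw [List.isPrefixOf_iff_prefix]; exact ⟨rest, rfl⟩)]
        simp only [List.length_cons, List.length_nil, List.drop_succ_cons, List.drop_zero]
        rw [ih rest [] (cur.reverse :: acc) (by simp at h; omega)]
        simp [pvSpl]
      · rw [if_neg (by
          rw [List.isPrefixOf_iff_prefix]
          intro hp
          rw [List.cons_prefix_cons] at hp
          exact hc hp.1.symm)]
        rw [ih rest (c :: cur) acc (by simp at h; omega)]
        simp [pvSpl, hc]

theorem pv_splitOn_eq (l : List Char) : PySem.Chars.splitOn l ['*'] = pvSpl [] l := by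
  rw [PySem.Chars.splitOn, pv_go_spec (l.length + 1) l [] [] (by omega)]; simp

theorem pvSpl_shape (l : List Char) : ∀ pre, pvSpl pre l = (pre ++ pvHd l) :: pvTl l := by
  induction l with
  | nil => intro pre; simp [pvSpl, pvHd, pvTl]
  | cons c t ih =>
    intro pre
    by_cases hc : c = '*'
    · simp [pvSpl, pvHd, pvTl, hc, ih]
    · simp [pvSpl, pvHd, pvTl, hc, ih]

theorem pvHd_no_star (t : List Char) (h : '*' ∉ t) : pvHd t = t ∧ pvTl t = [] := by
  induction t with
  | nil => simp [pvHd, pvTl]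
  | cons c r ih =>
    simp only [List.mem_cons, not_or] at h
    have := ih h.2
    have hc : ¬ c = '*' := fun hh => h.1 hh.symm
    simp [pvHd, pvTl, hc, this.1, this.2]

theorem pvHd_star (p r : List Char) (h : '*' ∉ p) :
    pvHd (p ++ '*' :: r) = p ∧ pvTl (p ++ '*' :: r) = pvSpl [] r := by
  induction p with
  | nil => simp [pvHd, pvTl]
  | cons c q ih =>
    simp only [List.mem_cons, not_or] at h
    have := ih h.2
    have hc : ¬ c = '*' := fun hh => h.1 hh.symm
    simp [pvHd, pvTl, hc, this.1, this.2]

mutual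
def pvEven : List Char → List Char
  | [] => []
  | c :: t =>
    if c = '*' then
      if PySem.Chars.find t ['*'] = -1 then '*' :: t
      else if ' ' ∈ t.take (PySem.Chars.find t ['*']).toNat then '*' :: pvEven t
      else "<strong>".toList ++ pvOdd t
    else c :: pvEven t
def pvOdd : List Char → List Char
  | [] => []
  | c :: t => if c = '*' then "</strong>".toList ++ pvEven t else c :: pvOdd t
end

def pvK : List (List Char) → List Char
  | [] => []
  | [p] => '*' :: p
  | p :: p' :: ps =>
    if PySem.Chars.isIn [' '] p = false then
      "<strong>".toList ++ p ++ "</strong>".toList ++ p' ++ pvK ps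
    else
      ('*' :: p) ++ pvK (p' :: ps)

def pvCK : List (List Char) → List Char
  | [] => []
  | p' :: ps => "</strong>".toList ++ p' ++ pvK ps

theorem pv_find_decomp (t : List Char) (h : PySem.Chars.find t ['*'] ≠ -1) :
    '*' ∉ t.take (PySem.Chars.find t ['*']).toNat ∧
    t = t.take (PySem.Chars.find t ['*']).toNat ++ '*' :: t.drop ((PySem.Chars.find t ['*']).toNat + 1) := by
  have h0 : 0 ≤ PySem.Chars.find t ['*'] := by
    have := PySem.Chars.neg_one_le_find t ['*']
    omega
  obtain ⟨hpre, hmin⟩ := PySem.Chars.find_spec h0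
  set e := (PySem.Chars.find t ['*']).toNat with he
  obtain ⟨r, hr⟩ := hpre
  have hdrop : t.drop e = '*' :: r := hr.symm
  have helen : e < t.length := by
    have : (t.drop e).length > 0 := by rw [hdrop]; simp
    simp at this; omega
  constructor
  · intro hmem
    obtain ⟨i, hi, hgi⟩ := List.mem_iff_getElem.mp hmem
    have hilen : i < e := by
      have := t.length_take_le e
      have := (t.take e).length
      simp [List.length_take] at hi; omega
    have hti : t[i]'(by omega) = '*' := by
      rw [← hgi]; exact (List.getElem_take).symm
    apply hmin i hilen
    refine ⟨t.drop (i+1), ?_⟩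
    rw [← hti]
    exact (List.getElem_cons_drop (as := t) (i := i) (h := by omega))
  · conv_lhs => rw [← List.take_append_drop e t]
    rw [hdrop]
    congr 1
    have : r = t.drop (e+1) := by
      have := (List.tail_drop (l := t) (i := e))
      rw [hdrop] at this
      simpa using this
    rw [this]

theorem pvK_eq_flatten (ps : List (List Char)) : (pvLoopB ps).flatten = pvK ps := by
  induction ps using pvK.induct with
  | case1 => rfl
  | case2 p => simp [pvLoopB, pvK]
  | case3 p p' ps hin ih => simp [pvLoopB, pvK, hin, ih]
  | case4 p p' ps hin ih => simp [pvLoopB, pvK, hin, ih]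

theorem pv_model_eq_split : ∀ (n : Nat) (l : List Char), l.length ≤ n →
    pvEven l = pvHd l ++ pvK (pvTl l) ∧ pvOdd l = pvHd l ++ pvCK (pvTl l) := by
  intro n
  induction n with
  | zero =>
    intro l hl
    have : l = [] := List.eq_nil_of_length_eq_zero (by omega)
    subst this
    simp [pvEven, pvOdd, pvHd, pvTl, pvK, pvCK]
  | succ n ih =>
    intro l hl
    cases l with
    | nil => simp [pvEven, pvOdd, pvHd, pvTl, pvK, pvCK]
    | cons c t =>
      have ht : t.length ≤ n := by simp at hl; omega
      by_cases hc : c = '*'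
      · subst hc
        have htl : pvTl ('*' :: t) = pvHd t :: pvTl t := by
          simp [pvTl, pvSpl_shape t []]
        have hhd : pvHd ('*' :: t) = [] := by simp [pvHd]
        constructor
        · -- even case
          by_cases hf : PySem.Chars.find t ['*'] = -1
          · have hns : '*' ∉ t := by
              intro hm
              rw [PySem.Chars.find_eq_neg_one_iff] at hf
              exact hf ((List.singleton_infix_iff _ _).mpr hm)
            obtain ⟨h1, h2⟩ := pvHd_no_star t hns
            rw [show pvEven ('*' :: t) = '*' :: t by simp [pvEven, hf]]
            rw [hhd, htl, h1, h2]
            simp [pvK]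
          · obtain ⟨hnp, hdec⟩ := pv_find_decomp t hf
            set e := (PySem.Chars.find t ['*']).toNat with he
            have hstar := pvHd_star (t.take e) (t.drop (e+1)) hnp
            have hhd_t : pvHd t = t.take e := by conv_lhs => rw [hdec]; rw [hstar.1]
            have htl_t : pvTl t = pvHd (t.drop (e+1)) :: pvTl (t.drop (e+1)) := by
              conv_lhs => rw [hdec]
              rw [hstar.2, pvSpl_shape _ []]
              simp
            by_cases hsp : ' ' ∈ t.take e
            · have heq : pvEven ('*' :: t) = '*' :: pvEven t := by
                simp [pvEven, hf, ← he, hsp]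
              rw [heq, (ih t ht).1, hhd, htl, htl_t]
              have hii : PySem.Chars.isIn [' '] (pvHd t) = true := by
                rw [pv_isIn_singleton, hhd_t]; exact hsp
              rw [hhd_t] at hii
              simp [pvK, hii, hhd_t]
            · have heq : pvEven ('*' :: t) = "<strong>".toList ++ pvOdd t := by
                simp [pvEven, hf, ← he, hsp]
              rw [heq, (ih t ht).2, hhd, htl, htl_t]
              have hii : PySem.Chars.isIn [' '] (pvHd t) = false := by
                rw [Bool.eq_false_iff]
                intro hcon
                exact hsp (by rw [← hhd_t]; exact (pv_isIn_singleton _ _).mp hcon)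
              rw [hhd_t] at hii
              simp [pvK, pvCK, hii, hhd_t]
        · -- odd case
          rw [show pvOdd ('*' :: t) = "</strong>".toList ++ pvEven t by simp [pvOdd]]
          rw [(ih t ht).1, hhd, htl]
          simp [pvCK]
      · have h1 : pvEven (c :: t) = c :: pvEven t := by simp [pvEven, hc]
        have h2 : pvOdd (c :: t) = c :: pvOdd t := by simp [pvOdd, hc]
        have h3 : pvHd (c :: t) = c :: pvHd t := by simp [pvHd, hc]
        have h4 : pvTl (c :: t) = pvTl t := by simp [pvTl, hc]
        obtain ⟨ihe, iho⟩ := ih t ht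
        rw [h1, h2, h3, h4, ihe, iho]
        simp

theorem pvLoopA_acc : ∀ (n : Nat) (s : List Char) (i count : Nat) (g : Bool) (acc : List (List Char)),
    s.length - i ≤ n → pvLoopA s i count g acc = acc ++ pvLoopA s i count g [] := by
  intro n
  induction n with
  | zero =>
    intro s i count g acc h
    have hx : pvLoopA s i count g [] = [] := by
      rw [pvLoopA, dif_neg (by omega)]
    rw [pvLoopA, dif_neg (by omega), hx, List.append_nil]
  | succ n ihn =>
    intro s i count g acc h
    by_cases hi : i < s.length
    · rw [pvLoopA]
      conv_rhs => rw [pvLoopA]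
      rw [dif_pos hi, dif_pos hi]
      by_cases hc : s[i] = '*'
      · rw [if_pos hc, if_pos hc]
        by_cases hg : g = true
        · rw [if_pos hg, if_pos hg]
          rw [ihn s (i+1) _ _ _ (by omega)]
          conv_rhs => rw [ihn s (i+1) _ _ _ (by omega)]
          simp
        · rw [if_neg hg, if_neg hg]
          by_cases hcnt : count % 2 = 0
          · rw [if_pos hcnt, if_pos hcnt]
            by_cases hF : PySem.Chars.findFrom s ['*'] ((i : Int) + 1) = -1
            · simp [hF, hcnt]
            · simp only [if_neg hF]
              by_cases hSp : PySem.Chars.isIn [' '] (PySem.List.slice s (some (i : Int)) (some (PySem.Chars.findFrom s ['*'] ((i : Int) + 1)))) = true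
              · rw [if_pos hSp, if_pos hSp]
                rw [ihn s (i+1) _ _ _ (by omega)]
                conv_rhs => rw [ihn s (i+1) _ _ _ (by omega)]
                simp
                try (intro hx; exfalso; omega)
              · rw [if_neg hSp, if_neg hSp]
                rw [ihn s (i+1) _ _ _ (by omega)]
                conv_rhs => rw [ihn s (i+1) _ _ _ (by omega)]
                simp
                try (intro hx; exfalso; omega)
          · rw [if_neg hcnt, if_neg hcnt]
            rw [ihn s (i+1) _ _ _ (by omega)]
            conv_rhs => rw [ihn s (i+1) _ _ _ (by omega)]
            simp
      · rw [if_neg hc, if_neg hc]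
        rw [ihn s (i+1) _ _ _ (by omega)]
        conv_rhs => rw [ihn s (i+1) _ _ _ (by omega)]
        simp
    · have hx : pvLoopA s i count g [] = [] := by
        rw [pvLoopA, dif_neg hi]
      rw [pvLoopA, dif_neg hi, hx, List.append_nil]

theorem pvLoopA_model : ∀ (n : Nat) (s : List Char) (i count : Nat), s.length - i ≤ n →
    (pvLoopA s i count false []).flatten =
      (if count % 2 = 0 then pvEven (s.drop i) else pvOdd (s.drop i)) := by
  intro n
  induction n with
  | zero =>
    intro s i count h
    rw [pvLoopA, dif_neg (by omega), List.drop_of_length_le (by omega)]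
    split_ifs <;> simp [pvEven, pvOdd]
  | succ n ihn =>
    intro s i count h
    by_cases hi : i < s.length
    · have hdrop : s.drop i = s[i] :: s.drop (i+1) :=
        (List.getElem_cons_drop (as := s) (i := i) (h := hi)).symm
      rw [pvLoopA, dif_pos hi]
      by_cases hc : s[i] = '*'
      · rw [if_pos hc, if_neg (by simp : ¬(false = true))]
        by_cases hcnt : count % 2 = 0
        · rw [if_pos hcnt]
          have hFF := PySem.Chars.findFrom_natCast s ['*'] (i+1) (by omega)
          have hcast : ((i : Int) + 1) = ((i+1 : Nat) : Int) := by push_cast; ring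
          rw [hcast, hFF]
          by_cases hf : PySem.Chars.find (s.drop (i+1)) ['*'] = -1
          · rw [if_pos hf, if_pos rfl]
            conv_rhs => rw [hdrop]
            simp [pvEven, hc, hf, hcnt, hdrop]
          · rw [if_neg hf]
            set f := PySem.Chars.find (s.drop (i+1)) ['*'] with hfdef
            have hf0 : 0 ≤ f := by
              have := PySem.Chars.neg_one_le_find (s.drop (i+1)) ['*']
              rw [← hfdef] at this; omega
            rw [if_neg (by omega : ¬(((i+1 : Nat) : Int) + f = -1))]
            have hecast : ((i+1 : Nat) : Int) + f = ((i + 1 + f.toNat : Nat) : Int) := by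
              push_cast [Int.toNat_of_nonneg hf0]; ring
            rw [hecast, PySem.List.slice_natCast,
                (by omega : i + 1 + f.toNat - i = f.toNat + 1), hdrop,
                List.take_succ_cons]
            have hmem : PySem.Chars.isIn [' '] (s[i] :: (s.drop (i+1)).take f.toNat) = true ↔
                ' ' ∈ (s.drop (i+1)).take f.toNat := by
              rw [pv_isIn_singleton]
              constructor
              · intro hx
                rcases List.mem_cons.mp hx with hx | hx
                · rw [hc] at hx; exact absurd hx (by decide)
                · exact hx
              · exact fun hx => List.mem_cons_of_mem _ hx
            by_cases hsp : ' ' ∈ (s.drop (i+1)).take f.toNat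
            · rw [if_pos (hmem.mpr hsp), if_pos hcnt, List.nil_append,
                  pvLoopA_acc n s (i+1) count false [['*']] (by omega)]
              rw [List.flatten_append, ihn s (i+1) count (by omega), if_pos hcnt]
              rw [show pvEven (s[i] :: s.drop (i+1)) = '*' :: pvEven (s.drop (i+1)) by
                    rw [pvEven, if_pos hc, if_neg (hfdef ▸ hf), if_pos (by rw [← hfdef]; exact hsp)]]
              simp
              try (intro hx; exfalso; omega)
            · rw [if_neg (fun hx => hsp (hmem.mp hx)),
                  if_neg (by omega : ¬((count+1) % 2 = 0)), List.nil_append,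
                  pvLoopA_acc n s (i+1) (count+1) false ["<strong>".toList] (by omega)]
              rw [List.flatten_append, ihn s (i+1) (count+1) (by omega),
                  if_neg (by omega : ¬((count+1) % 2 = 0))]
              rw [show pvEven (s[i] :: s.drop (i+1)) = "<strong>".toList ++ pvOdd (s.drop (i+1)) by
                    rw [pvEven, if_pos hc, if_neg (hfdef ▸ hf), if_neg (by rw [← hfdef]; exact hsp)]]
              simp
              try (intro hx; exfalso; omega)
        · rw [if_neg hcnt, if_pos (by omega : (count+1) % 2 = 0), List.nil_append,
              pvLoopA_acc n s (i+1) (count+1) false ["</strong>".toList] (by omega)]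
          rw [List.flatten_append, ihn s (i+1) (count+1) (by omega),
              if_pos (by omega : (count+1) % 2 = 0)]
          conv_rhs => rw [hdrop]
          rw [show pvOdd (s[i] :: s.drop (i+1)) = "</strong>".toList ++ pvEven (s.drop (i+1)) by
                rw [pvOdd, if_pos hc]]
          simp
          try (intro hx; exfalso; omega)
      · rw [if_neg hc]
        have hig : (if count % 2 = 0 then false else false) = false := by split <;> rfl
        rw [hig, List.nil_append,
            pvLoopA_acc n s (i+1) count false [[s[i]]] (by omega)]
        rw [List.flatten_append, ihn s (i+1) count (by omega)]
        conv_rhs => rw [hdrop]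
        by_cases hcnt : count % 2 = 0
        · rw [if_pos hcnt, if_pos hcnt,
              show pvEven (s[i] :: s.drop (i+1)) = s[i] :: pvEven (s.drop (i+1)) by
                rw [pvEven, if_neg hc]]
          simp
        · rw [if_neg hcnt, if_neg hcnt,
              show pvOdd (s[i] :: s.drop (i+1)) = s[i] :: pvOdd (s.drop (i+1)) by
                rw [pvOdd, if_neg hc]]
          simp
    · rw [pvLoopA, dif_neg hi, List.drop_of_length_le (by omega)]
      split_ifs <;> simp [pvEven, pvOdd]

theorem pv_join_nil (l : List (List Char)) : PySem.Chars.join [] l = l.flatten := by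
  have hmain : ∀ (l : List (List Char)), (List.intersperse ([] : List Char) l).flatten = l.flatten := by
    intro l
    induction l with
    | nil => rfl
    | cons a t ih =>
      cases t with
      | nil => rfl
      | cons b t' => simp_all [List.intersperse]
  simp [PySem.Chars.join, List.intercalate, hmain]

-- ===== VERDICT (by name: the statement is the Claim_ definition above) =====
theorem replace_asterisks_spec : Claim_equal_replace_asterisks := by
  intro s _
  unfold Spec_replace_asterisks replace_asterisks replace_asterisks_alt
  rw [pv_splitOn_eq, pvSpl_shape _ []]
  simp only [List.nil_append]
  rw [pv_join_nil, pv_join_nil]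
  congr 1
  rw [pvLoopA_model s.toList.length s.toList 0 0 (by omega)]
  rw [if_pos (by omega : (0 : Nat) % 2 = 0), List.drop_zero]
  rw [(pv_model_eq_split s.toList.length s.toList le_rfl).1]
  simp [pvK_eq_flatten]
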